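-- pv_equiv track=rewrite | github.com/TobyYang7/csc3050_toby | CSC3050_P2/simulator.py | sign_bin_to_dec
-- ===== SOURCE A (Python) =====
-- def sign_bin_to_dec(string1):
--     decimal_int = 0
--     if len(string1) == 1:
--         decimal_int = -1*int(string1)
--     else:
--         for i in range(1, len(string1)):
--             decimal_int += int(string1[i]) * 2**(len(string1)-1-i)
--         if string1[0] == '1':
--             decimal_int += -2**(len(string1)-1)
--     return decimal_int
-- ===== SOURCE B (Python) =====
-- def sign_bin_to_dec(string1):
--     # Horner's method: single left-to-right pass, no per-step power computation
--     if len(string1) == 1: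
--         return -int(string1)
--     v = -1 if string1[0] == '1' else 0
--     for ch in string1[1:]:
--         v = v * 2 + int(ch)
--     return v
-- ===== Notes on version B (the rewrite author's own statement) =====
-- stated objective: alternative
-- what changed: Replaces the positional sum with a per-index power computation 2**(len-1-i) by a single Horner accumulator pass (v = v*2 + digit) seeded with -1/0 from the sign bit.
import Mathlib
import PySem

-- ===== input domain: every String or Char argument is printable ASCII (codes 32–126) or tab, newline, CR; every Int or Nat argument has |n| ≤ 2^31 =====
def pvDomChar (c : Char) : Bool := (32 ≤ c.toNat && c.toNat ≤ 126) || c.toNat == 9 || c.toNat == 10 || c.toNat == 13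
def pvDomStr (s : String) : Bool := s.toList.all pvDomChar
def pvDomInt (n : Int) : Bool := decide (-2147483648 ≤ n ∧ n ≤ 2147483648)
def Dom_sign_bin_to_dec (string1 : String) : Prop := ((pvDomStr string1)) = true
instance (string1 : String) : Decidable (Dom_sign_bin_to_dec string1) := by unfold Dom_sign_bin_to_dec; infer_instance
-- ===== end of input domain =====

-- B replaces A's positional sum (a fresh power 2**(len-1-i) per index) by one Horner pass.

-- int(c) for a digit character c (exact on the digit characters Pre_ admits)
def pvDigit (c : Char) : Int := (c.toNat : Int) - 48

-- ===== PORT A =====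
def sign_bin_to_dec (string1 : String) : Int :=
  let cs := string1.toList
  if cs.length = 1 then
    -1 * pvDigit (cs.headD '0')
  else
    let n : Int := cs.length
    let d := (PySem.List.pyRange 1 n 1).foldl
      (fun acc i => acc + pvDigit ((PySem.List.pyGet? cs i).getD '0') * 2 ^ ((n - 1 - i).toNat)) 0
    if (PySem.List.pyGet? cs 0).getD '0' = '1' then d + -(2 ^ ((n - 1).toNat)) else d

-- ===== PORT B =====
def sign_bin_to_dec_alt (string1 : String) : Int :=
  let cs := string1.toList
  if cs.length = 1 then
    -(pvDigit (cs.headD '0'))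
  else
    let v0 : Int := if cs.headD '0' = '1' then -1 else 0
    (cs.drop 1).foldl (fun v c => v * 2 + pvDigit c) v0

-- ===== PRECONDITION & SPEC =====
-- Pre_ excludes exactly the inputs where the Python A raises: the empty string
-- (IndexError at string1[0]), a single non-digit character (ValueError from int(string1)),
-- and strings whose characters AFTER the first contain a non-digit (ValueError from int(string1[i]);
-- the first character of a multi-char string is only compared against the sign digit, never parsed).
def Pre_sign_bin_to_dec (string1 : String) : Prop :=
  string1.toList ≠ [] ∧
  ((string1.toList.drop 1).all fun c => c.isDigit) = true ∧
  (string1.toList.length = 1 → (string1.toList.all fun c => c.isDigit) = true)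
instance (string1 : String) : Decidable (Pre_sign_bin_to_dec string1) := by
  unfold Pre_sign_bin_to_dec; infer_instance
def pvWitness_sign_bin_to_dec : String := "1011"

def Spec_sign_bin_to_dec (string1 : String) (out : Int) : Prop := out = sign_bin_to_dec_alt string1
instance (string1 : String) (out : Int) : Decidable (Spec_sign_bin_to_dec string1 out) := by unfold Spec_sign_bin_to_dec; infer_instance

-- ===== CLAIM (what is proved, stated in full; the proofs are below) =====
def Claim_equal_sign_bin_to_dec : Prop := ∀ (string1 : String), Dom_sign_bin_to_dec string1 → Pre_sign_bin_to_dec string1 → Spec_sign_bin_to_dec string1 (sign_bin_to_dec string1)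

-- ===== LEMMAS AND PROOFS =====

-- positional value of the magnitude part: Σ digit(l[j]) * 2^(len-1-j)
def posVal : List Char → Int
  | [] => 0
  | c :: t => pvDigit c * 2 ^ t.length + posVal t

theorem horner_eq (t : List Char) :
    ∀ v : Int, t.foldl (fun v c => v * 2 + pvDigit c) v = v * 2 ^ t.length + posVal t := by
  induction t with
  | nil => intro v; simp [posVal]
  | cons c t ih =>
      intro v
      simp only [List.foldl_cons, ih, posVal, List.length_cons]
      ring

theorem rangeFold (cs : List Char) :
    ∀ (m : Nat) (k acc : Int), 0 ≤ k → k + m = cs.length →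
    (PySem.List.pyRange k cs.length 1).foldl
        (fun acc i => acc + pvDigit ((PySem.List.pyGet? cs i).getD '0') * 2 ^ (((cs.length : Int) - 1 - i).toNat)) acc
      = acc + posVal (cs.drop k.toNat) := by
  intro m
  induction m with
  | zero =>
      intro k acc hk hlen
      rw [PySem.List.pyRange_one_eq_nil (by omega)]
      have : cs.length ≤ k.toNat := by omega
      simp [List.drop_eq_nil_of_le this, posVal]
  | succ m ih =>
      intro k acc hk hlen
      have hklt : k < (cs.length : Int) := by omega
      rw [PySem.List.pyRange_one_cons hklt]
      have hkn : k.toNat < cs.length := by omega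
      rw [List.foldl_cons,
        PySem.List.pyGet?_eq_some_getElem cs hk hklt]
      rw [ih (k + 1) _ (by omega) (by omega)]
      have hdrop : cs.drop k.toNat = cs[k.toNat] :: cs.drop (k.toNat + 1) :=
        List.drop_eq_getElem_cons hkn
      have h1 : (k + 1).toNat = k.toNat + 1 := by omega
      have h2 : (cs.drop (k.toNat + 1)).length = cs.length - (k.toNat + 1) := by
        simp
      rw [h1, hdrop]
      simp only [posVal, Option.getD_some, h2]
      have h3 : ((cs.length : Int) - 1 - k).toNat = cs.length - (k.toNat + 1) := by omega
      rw [h3]; ring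

theorem main_eq (cs : List Char) :
    (if cs.length = 1 then
      -1 * pvDigit (cs.headD '0')
    else
      let n : Int := cs.length
      let d := (PySem.List.pyRange 1 n 1).foldl
        (fun acc i => acc + pvDigit ((PySem.List.pyGet? cs i).getD '0') * 2 ^ ((n - 1 - i).toNat)) 0
      if (PySem.List.pyGet? cs 0).getD '0' = '1' then d + -(2 ^ ((n - 1).toNat)) else d)
    = (if cs.length = 1 then
        -(pvDigit (cs.headD '0'))
      else
        let v0 : Int := if cs.headD '0' = '1' then -1 else 0
        (cs.drop 1).foldl (fun v c => v * 2 + pvDigit c) v0) := by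
  by_cases h1 : cs.length = 1
  · simp [h1]
  · simp only [h1, if_false]
    cases cs with
    | nil => simp [PySem.List.pyRange_one_eq_nil, PySem.List.pyGet?, PySem.List.pyIdx?]
    | cons c t =>
        have hfold := rangeFold (c :: t) t.length 1 0 (by omega) (by simp; omega)
        have hget0 : (PySem.List.pyGet? (c :: t) 0).getD '0' = c := by
          simp
        simp only [List.length_cons] at hfold ⊢
        have hdrop1 : (c :: t).drop (1 : Int).toNat = t := by simp
        rw [hdrop1] at hfold
        simp only [hfold, hget0, List.headD_cons, List.drop_succ_cons, List.drop_zero,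
          horner_eq, zero_add]
        have hexp : ((((t.length + 1 : Nat)) : Int) - 1).toNat = t.length := by omega
        by_cases hc : c = '1'
        · rw [if_pos hc, if_pos hc, hexp]; ring
        · rw [if_neg hc, if_neg hc]; ring

-- ===== VERDICT (by name: the statement is the Claim_ definition above) =====
theorem sign_bin_to_dec_spec : Claim_equal_sign_bin_to_dec := by
  intro s _ _
  unfold Spec_sign_bin_to_dec sign_bin_to_dec sign_bin_to_dec_alt
  exact main_eq s.toList
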